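-- pv_equiv track=rewrite | github.com/alvarocleite/AdventOfCode2025 | day06/day06.py | define_spans
-- ===== SOURCE A (Python) =====
-- from typing import List, Tuple
--
-- def define_spans(occupancy_map: List[bool]) -> List[Tuple[int, int]]:
--     """
--     Defines spans of contiguous occupied columns from an occupancy map.
--
--     Args:
--         occupancy_map: A list of booleans indicating occupied character columns.
--
--     Returns:
--         A list of tuples, where each tuple is (start_index, end_index) of a span.
--     """
--     spans: List[Tuple[int, int]] = []
--     in_span = False
--     start = 0
--     width = len(occupancy_map)
--
--     for x in range(width):
--         if occupancy_map[x] and not in_span: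
--             in_span = True
--             start = x
--         elif not occupancy_map[x] and in_span:
--             spans.append((start, x))
--             in_span = False
--
--     if in_span:
--         spans.append((start, width))
--
--     return spans
-- ===== SOURCE B (Python) =====
-- from itertools import groupby
-- from typing import List, Tuple
--
-- def define_spans(occupancy_map: List[bool]) -> List[Tuple[int, int]]:
--     spans: List[Tuple[int, int]] = []
--     pos = 0
--     for key, group in groupby(occupancy_map):
--         length = sum(1 for _ in group)
--         if key:
--             spans.append((pos, pos + length))
--         pos += length
--     return spans
-- ===== Notes on version B (the rewrite author's own statement) =====
-- stated objective: idiomatic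
-- what changed: Replaces the per-index in_span/start boolean state machine with an itertools.groupby pass over runs, emitting (pos, pos+len) for each truthy run while advancing a single running index.
import Mathlib
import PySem

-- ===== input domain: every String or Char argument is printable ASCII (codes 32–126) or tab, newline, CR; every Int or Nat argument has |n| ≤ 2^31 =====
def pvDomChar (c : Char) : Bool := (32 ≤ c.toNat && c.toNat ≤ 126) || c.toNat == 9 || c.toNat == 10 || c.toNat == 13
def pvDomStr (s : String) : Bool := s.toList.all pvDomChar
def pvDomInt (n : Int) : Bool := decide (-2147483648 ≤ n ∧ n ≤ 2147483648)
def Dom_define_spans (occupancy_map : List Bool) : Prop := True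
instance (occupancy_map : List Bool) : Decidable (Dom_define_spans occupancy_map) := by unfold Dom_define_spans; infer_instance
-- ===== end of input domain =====

-- B replaces A's in_span/start state machine with an itertools.groupby walk over runs (idiomatic); same cost.

-- ===== PORT A =====
-- A's for-x-in-range(width) loop over occupancy_map[x]: a fold over the list carrying
-- the same state (spans, in_span, start) plus the running index x.
def define_spans_step (s : List (Int × Int) × Bool × Int × Int) (v : Bool) :
    List (Int × Int) × Bool × Int × Int :=
  let (spans, in_span, start, x) := s
  if v && !in_span then (spans, true, x, x + 1)
  else if !v && in_span then (spans ++ [(start, x)], false, start, x + 1)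
  else (spans, in_span, start, x + 1)

def define_spans (occupancy_map : List Bool) : List (Int × Int) :=
  let width : Int := occupancy_map.length
  let st := occupancy_map.foldl define_spans_step ([], false, 0, 0)
  if st.2.1 then st.1 ++ [(st.2.2.1, width)] else st.1

-- ===== PORT B =====
-- B's groupby loop: each step peels one maximal run of equal values (key b, length len),
-- emits (pos, pos+len) if the key is truthy, and advances pos by len.
def define_spans_alt_go (pos : Int) : List Bool → List (Int × Int)
  | [] => []
  | b :: rest =>
    let len : Int := 1 + (rest.takeWhile (· == b)).length
    let rem := rest.dropWhile (· == b)
    if b then (pos, pos + len) :: define_spans_alt_go (pos + len) rem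
    else define_spans_alt_go (pos + len) rem
termination_by l => l.length
decreasing_by
  all_goals
    simp only [List.length_cons]
    have := List.length_dropWhile_le (p := (· == b)) (l := rest)
    omega

def define_spans_alt (occupancy_map : List Bool) : List (Int × Int) :=
  define_spans_alt_go 0 occupancy_map

-- ===== PRECONDITION & SPEC =====
def Spec_define_spans (occupancy_map : List Bool) (out : List (Int × Int)) : Prop := out = define_spans_alt occupancy_map
instance (occupancy_map : List Bool) (out : List (Int × Int)) : Decidable (Spec_define_spans occupancy_map out) := by unfold Spec_define_spans; infer_instance

-- ===== CLAIM (what is proved, stated in full; the proofs are below) =====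
def Claim_equal_define_spans : Prop := ∀ (occupancy_map : List Bool), Dom_define_spans occupancy_map → Spec_define_spans occupancy_map (define_spans occupancy_map)

-- ===== LEMMAS AND PROOFS =====

-- skipping one false at a time equals skipping the whole false run at once
theorem alt_go_false (x : Int) (l : List Bool) :
    define_spans_alt_go x (false :: l) = define_spans_alt_go (x + 1) l := by
  cases l with
  | nil => simp [define_spans_alt_go]
  | cons b r =>
    cases b with
    | false =>
      simp only [define_spans_alt_go, List.takeWhile_cons, List.dropWhile_cons]
      norm_num
      ring_nf
    | true =>
      simp [define_spans_alt_go]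

def define_spans_finish (width : Int) (st : List (Int × Int) × Bool × Int × Int) :
    List (Int × Int) :=
  if st.2.1 then st.1 ++ [(st.2.2.1, width)] else st.1

theorem main_invariant (l : List Bool) :
    ∀ (x : Int) (spans : List (Int × Int)) (start : Int),
      (define_spans_finish (x + l.length) (l.foldl define_spans_step (spans, false, start, x))
        = spans ++ define_spans_alt_go x l)
      ∧ (define_spans_finish (x + l.length) (l.foldl define_spans_step (spans, true, start, x))
        = spans ++ (start, x + ((l.takeWhile (· == true)).length : Int))
            :: define_spans_alt_go (x + ((l.takeWhile (· == true)).length : Int))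
                (l.dropWhile (· == true))) := by
  induction l with
  | nil =>
    intro x spans start
    simp [define_spans_finish, define_spans_alt_go]
  | cons b l ih =>
    intro x spans start
    cases b with
    | false =>
      constructor
      · have h := (ih (x + 1) spans start).1
        simp only [List.foldl_cons, define_spans_step, List.length_cons] at h ⊢
        norm_num at h ⊢
        rw [show x + (↑l.length + 1) = x + 1 + ↑l.length by ring, h, alt_go_false]
      · have h := (ih (x + 1) (spans ++ [(start, x)]) start).1
        simp only [List.foldl_cons, define_spans_step, List.length_cons,
          List.takeWhile_cons, List.dropWhile_cons] at h ⊢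
        norm_num at h ⊢
        rw [show x + (↑l.length + 1) = x + 1 + ↑l.length by ring, h, alt_go_false]
    | true =>
      constructor
      · have h := (ih (x + 1) spans x).2
        simp only [List.foldl_cons, define_spans_step, List.length_cons] at h ⊢
        norm_num at h ⊢
        rw [show x + (↑l.length + 1) = x + 1 + ↑l.length by ring, h]
        simp only [define_spans_alt_go]
        norm_num [add_assoc]
      · have h := (ih (x + 1) spans start).2
        simp only [List.foldl_cons, define_spans_step, List.length_cons,
          List.takeWhile_cons, List.dropWhile_cons] at h ⊢
        norm_num at h ⊢
        rw [show x + (↑l.length + 1) = x + 1 + ↑l.length by ring, h]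
        ring_nf

-- ===== VERDICT (by name: the statement is the Claim_ definition above) =====
theorem define_spans_spec : Claim_equal_define_spans := by
  intro l _
  unfold Spec_define_spans define_spans define_spans_alt
  have h := (main_invariant l 0 [] 0).1
  simpa [define_spans_finish] using h
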